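-- pv_equiv track=rewrite | github.com/Distera/machine-learning | main.py | assign_number_to_value
-- ===== SOURCE A (Python) =====
-- def assign_number_to_value(data):
--     count = 0
--     new_data = {}
--     unique_values = []
--     rez_list = []
--
--     for text in data:
--         if text not in unique_values:
--             unique_values.append(text)
--             new_data[text] = count
--             count = count + 1
--
--     for text in data:
--         rez_list.append(new_data[text])
--     return rez_list
-- ===== SOURCE B (Python) =====
-- def assign_number_to_value(data):
--     # rank of each element = number of distinct values seen strictly before its
--     # first occurrence (first occurrences enumerate the ordinals 0,1,2,...)
--     return [len(set(data[:data.index(t)])) for t in data]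
-- ===== Notes on version B (the rewrite author's own statement) =====
-- stated objective: simpler
-- what changed: B drops A's counter/dict machinery entirely: it is a one-line closed form computing each element's ordinal as the number of distinct values occurring strictly before that element's first occurrence (len(set(data[:data.index(t)])))
import Mathlib
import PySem

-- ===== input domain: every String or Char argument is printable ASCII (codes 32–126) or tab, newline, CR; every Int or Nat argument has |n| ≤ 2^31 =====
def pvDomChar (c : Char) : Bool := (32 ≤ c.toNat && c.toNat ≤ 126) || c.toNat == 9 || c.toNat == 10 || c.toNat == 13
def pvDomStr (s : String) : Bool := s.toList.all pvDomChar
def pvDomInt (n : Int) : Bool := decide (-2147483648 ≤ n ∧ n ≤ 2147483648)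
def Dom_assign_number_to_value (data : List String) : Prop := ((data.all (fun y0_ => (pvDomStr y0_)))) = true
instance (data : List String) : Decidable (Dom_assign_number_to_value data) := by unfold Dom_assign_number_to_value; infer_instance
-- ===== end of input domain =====

-- B replaces A's counter/dict machinery by a closed form per element: the ordinal of a
-- value is the number of distinct values occurring strictly before its first occurrence.

-- ===== PORT A =====
-- First loop: state (count, new_data, unique_values).
def pvAStep (st : Int × PySem.Dict String Int × List String) (text : String) :
    Int × PySem.Dict String Int × List String :=
  if text ∈ st.2.2 then st
  else (st.1 + 1, st.2.1.insert text st.1, st.2.2 ++ [text])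

def assign_number_to_value (data : List String) : List Int :=
  let st := data.foldl pvAStep (0, PySem.Dict.empty, [])
  -- new_data[text]: the lookup always succeeds (every text was inserted in the first loop),
  -- so the KeyError branch is unreachable and getD's default is never used.
  data.foldl (fun rez text => rez ++ [st.2.1.getD text 0]) []

-- ===== PORT B =====
def assign_number_to_value_alt (data : List String) : List Int :=
  -- data.index(t) always succeeds (t ∈ data), so getD's default is never used;
  -- data[:k] for this nonnegative in-range k is data.take k (PySem.List.slice_to_natCast).
  data.map (fun t =>
    ((PySem.Set.ofList (data.take ((PySem.List.index? data t).getD 0))).length : Int))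

-- ===== PRECONDITION & SPEC =====
def Spec_assign_number_to_value (data : List String) (out : List Int) : Prop := out = assign_number_to_value_alt data
instance (data : List String) (out : List Int) : Decidable (Spec_assign_number_to_value data out) := by unfold Spec_assign_number_to_value; infer_instance

-- ===== CLAIM (what is proved, stated in full; the proofs are below) =====
def Claim_equal_assign_number_to_value : Prop := ∀ (data : List String), Dom_assign_number_to_value data → Spec_assign_number_to_value data (assign_number_to_value data)

-- ===== LEMMAS AND PROOFS =====

-- A's second loop is a map over the data with the final dict.
lemma foldl_append_singleton (f : String → Int) (l : List String) (acc : List Int) :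
    l.foldl (fun rez text => rez ++ [f text]) acc = acc ++ l.map f := by
  induction l generalizing acc with
  | nil => simp
  | cons t l ih => simp [List.foldl, ih]

-- Invariant of A's first loop after processing a prefix p:
-- unique_values is the dedup of p, count is its size, and the dict maps each seen value
-- to the number of distinct values before its first occurrence in p.
def pvInv (p : List String) (st : Int × PySem.Dict String Int × List String) : Prop :=
  st.2.2 = PySem.Set.ofList p ∧
  st.1 = ((PySem.Set.ofList p).length : Int) ∧
  ∀ t ∈ (PySem.Set.ofList p : List String),
    st.2.1.get? t =
      some ((PySem.Set.ofList (p.take ((PySem.List.index? p t).getD 0))).length : Int)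

lemma pvInv_step (p : List String) (st : Int × PySem.Dict String Int × List String)
    (x : String) (h : pvInv p st) : pvInv (p ++ [x]) (pvAStep st x) := by
  obtain ⟨huv, hc, hd⟩ := h
  have hofl : PySem.Set.ofList (p ++ [x]) = PySem.Set.add (PySem.Set.ofList p) x := by
    simp [PySem.Set.ofList_eq_foldl, List.foldl_append]
  by_cases hxp : x ∈ p
  · -- x already seen: state unchanged, dedup unchanged, first occurrences unchanged
    have hx : x ∈ (PySem.Set.ofList p : List String) := (PySem.Set.mem_ofList _ _).mpr hxp
    have hadd : PySem.Set.add (PySem.Set.ofList p) x = PySem.Set.ofList p := by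
      simp [PySem.Set.add, PySem.Set.contains, hx]
    have hstep : pvAStep st x = st := by
      simp [pvAStep, huv, PySem.Set.mem_ofList, hxp]
    rw [hstep]; unfold pvInv; rw [hofl, hadd]
    refine ⟨huv, hc, ?_⟩
    intro t ht
    have htp : t ∈ p := (PySem.Set.mem_ofList _ _).mp ht
    have hidx : PySem.List.index? (p ++ [x]) t = PySem.List.index? p t :=
      PySem.List.index?_append_of_mem _ htp
    obtain ⟨k, hk⟩ := Option.isSome_iff_exists.mp
      ((PySem.List.index?_isSome_iff (xs := p) (v := t)).mpr htp)
    obtain ⟨hklt, -, -⟩ := PySem.List.getElem_of_index?_eq_some hk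
    have htake : (p ++ [x]).take k = p.take k :=
      List.take_append_of_le_length (le_of_lt hklt)
    rw [hidx, hk, Option.getD_some, htake]
    have hdt := hd t ht
    rw [hk, Option.getD_some] at hdt
    exact hdt
  · -- x new: appended to unique_values, inserted into the dict with ordinal count
    have hx : x ∉ (PySem.Set.ofList p : List String) := fun h => hxp ((PySem.Set.mem_ofList _ _).mp h)
    have hadd : PySem.Set.add (PySem.Set.ofList p) x = PySem.Set.ofList p ++ [x] := by
      simp [PySem.Set.add, PySem.Set.contains, hx]
    have hstep : pvAStep st x = (st.1 + 1, st.2.1.insert x st.1, st.2.2 ++ [x]) := by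
      simp [pvAStep, huv, PySem.Set.mem_ofList, hxp]
    rw [hstep]; unfold pvInv; rw [hofl, hadd]
    refine ⟨by rw [huv], ?_, ?_⟩
    · rw [hc]; simp
    · intro t ht
      rcases List.mem_append.mp ht with htp' | htx
      · -- old key t ≠ x: insert does not touch it, nor does appending x change its prefix
        have htp : t ∈ p := (PySem.Set.mem_ofList _ _).mp htp'
        have hne : t ≠ x := fun hh => hxp (hh ▸ htp)
        have hidx : PySem.List.index? (p ++ [x]) t = PySem.List.index? p t :=
          PySem.List.index?_append_of_mem _ htp
        obtain ⟨k, hk⟩ := Option.isSome_iff_exists.mp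
          ((PySem.List.index?_isSome_iff (xs := p) (v := t)).mpr htp)
        obtain ⟨hklt, -, -⟩ := PySem.List.getElem_of_index?_eq_some hk
        have htake : (p ++ [x]).take k = p.take k :=
          List.take_append_of_le_length (le_of_lt hklt)
        show (st.2.1.insert x st.1).get? t = _
        rw [PySem.Dict.get?_insert_of_ne st.2.1 st.1 hne, hidx, hk, Option.getD_some, htake]
        have hdt := hd t htp'
        rw [hk, Option.getD_some] at hdt
        exact hdt
      · -- the new key x: first occurrence at position p.length, its prefix is all of p
        have htx' : t = x := by simpa using htx
        subst htx'
        have hidx : PySem.List.index? (p ++ [t]) t = some p.length :=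
          PySem.List.index?_append_singleton_self p t hxp
        have htake : (p ++ [t]).take p.length = p := by
          rw [List.take_append_of_le_length le_rfl, List.take_length]
        show (st.2.1.insert t st.1).get? t = _
        rw [PySem.Dict.get?_insert_self, hidx, Option.getD_some, htake, hc]

lemma pvInv_foldl (l p : List String) (st : Int × PySem.Dict String Int × List String)
    (h : pvInv p st) : pvInv (p ++ l) (l.foldl pvAStep st) := by
  induction l generalizing p st with
  | nil => simpa using h
  | cons x l ih =>
    have := ih (p ++ [x]) (pvAStep st x) (pvInv_step p st x h)
    simpa [List.foldl] using this

-- ===== VERDICT (by name: the statement is the Claim_ definition above) =====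
theorem assign_number_to_value_spec : Claim_equal_assign_number_to_value := by
  intro data _
  unfold Spec_assign_number_to_value assign_number_to_value assign_number_to_value_alt
  rw [foldl_append_singleton]
  have hinv : pvInv data (data.foldl pvAStep (0, PySem.Dict.empty, [])) := by
    have h0 : pvInv [] ((0 : Int), PySem.Dict.empty, ([] : List String)) := by
      refine ⟨rfl, by simp [PySem.Set.ofList], ?_⟩
      intro t ht
      simp [PySem.Set.ofList] at ht
    simpa using pvInv_foldl data [] _ h0
  obtain ⟨-, -, hd⟩ := hinv
  simp only [List.nil_append]
  apply List.map_congr_left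
  intro t ht
  have ht' : t ∈ (PySem.Set.ofList data : List String) := (PySem.Set.mem_ofList _ _).mpr ht
  exact PySem.Dict.getD_of_get?_eq_some _ _ (hd t ht')
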